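-- pv_equiv track=rewrite | github.com/HassanRaja00/cse-354-NLP | a3_raja_112249751.py | extractUnigramCounts
-- ===== SOURCE A (Python) =====
-- def extractUnigramCounts(data, vocab):
--     unigramCounts = {}
--     for sentence in data:
--         for word in sentence:
--             if word not in vocab:
--                 if '<OOV>' not in unigramCounts:
--                     unigramCounts['<OOV>'] = 0
--                 unigramCounts['<OOV>'] += 1
--             else:
--                 if word not in unigramCounts:
--                     unigramCounts[word] = 0
--                 unigramCounts[word] += 1
--
--     return unigramCounts
-- ===== SOURCE B (Python) =====
-- def extractUnigramCounts(data, vocab):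
--     # pass 1: raw frequency table over all words, no OOV logic
--     raw = {}
--     for sentence in data:
--         for word in sentence:
--             raw[word] = raw.get(word, 0) + 1
--     # pass 2: collapse out-of-vocabulary entries into '<OOV>'
--     counts = {}
--     for word, cnt in raw.items():
--         key = word if word in vocab else '<OOV>'
--         counts[key] = counts.get(key, 0) + cnt
--     return counts
-- ===== Notes on version B (the rewrite author's own statement) =====
-- stated objective: alternative
-- what changed: B is count-then-aggregate: a first pass builds a raw word-frequency table with no vocabulary logic, then a second pass over that table's (word,count) items collapses out-of-vocabulary entries into '<OOV>', instead of A's single pass that tests vocabulary membership per token.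
import Mathlib
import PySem

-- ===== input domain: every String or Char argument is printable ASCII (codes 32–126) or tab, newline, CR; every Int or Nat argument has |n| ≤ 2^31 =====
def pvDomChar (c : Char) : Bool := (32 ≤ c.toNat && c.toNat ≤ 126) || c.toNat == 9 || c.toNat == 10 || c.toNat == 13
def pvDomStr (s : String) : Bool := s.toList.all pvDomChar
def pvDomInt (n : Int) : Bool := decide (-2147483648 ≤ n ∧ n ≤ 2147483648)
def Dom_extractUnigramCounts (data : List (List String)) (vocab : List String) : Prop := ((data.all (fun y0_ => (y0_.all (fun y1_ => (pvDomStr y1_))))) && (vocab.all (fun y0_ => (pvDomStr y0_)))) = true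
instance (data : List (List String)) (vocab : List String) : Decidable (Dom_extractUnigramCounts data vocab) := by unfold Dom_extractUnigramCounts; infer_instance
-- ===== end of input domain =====

-- B replaces A's per-token vocabulary test by count-then-aggregate: one pass builds a raw
-- word-frequency table, a second pass over its (word, count) items collapses OOV keys into '<OOV>'.

-- ===== PORT A =====
-- one token of A's loop body: the two branches of 'if word not in vocab', each doing
-- 'if key not in dict: dict[key] = 0' then 'dict[key] += 1'
def pvStepA (vocab : List String) (d : PySem.Dict String Int) (word : String) : PySem.Dict String Int :=
  if !(vocab.contains word) then
    let d := if !(d.contains "<OOV>") then d.insert "<OOV>" (0 : Int) else d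
    d.insert "<OOV>" (d.getD "<OOV>" 0 + 1)
  else
    let d := if !(d.contains word) then d.insert word (0 : Int) else d
    d.insert word (d.getD word 0 + 1)

def extractUnigramCounts (data : List (List String)) (vocab : List String) : List (String × Int) :=
  (data.foldl (fun d sentence => sentence.foldl (pvStepA vocab) d) PySem.Dict.empty).items

-- ===== PORT B =====
-- Source B's "key = word if word in vocab else '<OOV>'"
def pvKeyOf (vocab : List String) (word : String) : String :=
  if vocab.contains word then word else "<OOV>"

def extractUnigramCounts_alt (data : List (List String)) (vocab : List String) : List (String × Int) :=
  -- pass 1: raw frequency table, no OOV logic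
  let raw := data.foldl (fun d sentence =>
    sentence.foldl (fun d word => d.insert word (d.getD word 0 + 1)) d) PySem.Dict.empty
  -- pass 2: collapse OOV entries
  let counts := raw.items.foldl (fun r p =>
    r.insert (pvKeyOf vocab p.1) (r.getD (pvKeyOf vocab p.1) 0 + p.2)) PySem.Dict.empty
  counts.items

-- ===== PRECONDITION & SPEC =====
def Spec_extractUnigramCounts (data : List (List String)) (vocab : List String) (out : List (String × Int)) : Prop := out = extractUnigramCounts_alt data vocab
instance (data : List (List String)) (vocab : List String) (out : List (String × Int)) : Decidable (Spec_extractUnigramCounts data vocab out) := by unfold Spec_extractUnigramCounts; infer_instance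

-- ===== CLAIM (what is proved, stated in full; the proofs are below) =====
def Claim_equal_extractUnigramCounts : Prop := ∀ (data : List (List String)) (vocab : List String), Dom_extractUnigramCounts data vocab → Spec_extractUnigramCounts data vocab (extractUnigramCounts data vocab)

-- ===== LEMMAS AND PROOFS =====

-- A's loop body is one keyed increment
theorem pvStepA_eq (vocab : List String) (d : PySem.Dict String Int) (w : String) :
    pvStepA vocab d w = d.insert (pvKeyOf vocab w) (d.getD (pvKeyOf vocab w) 0 + 1) := by
  unfold pvStepA pvKeyOf
  cases hv : vocab.contains w with
  | false =>
    simp only [Bool.not_false, if_true]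
    cases hc : PySem.Dict.contains d "<OOV>" with
    | false =>
      simp [PySem.Dict.getD_insert_self, PySem.Dict.insert_insert_self,
        PySem.Dict.getD_of_not_contains d (0 : Int) hc]
    | true => simp
  | true =>
    simp only [Bool.not_true, if_true]
    cases hc : PySem.Dict.contains d w with
    | false =>
      simp [PySem.Dict.getD_insert_self, PySem.Dict.insert_insert_self,
        PySem.Dict.getD_of_not_contains d (0 : Int) hc]
    | true => simp

-- A's whole loop is a counter of the key-mapped token stream
theorem pvA_eq_counter (data : List (List String)) (vocab : List String) :
    data.foldl (fun d sentence => sentence.foldl (pvStepA vocab) d) PySem.Dict.empty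
      = PySem.Dict.counter (data.flatten.map (pvKeyOf vocab)) := by
  rw [← List.foldl_flatten]
  have h : pvStepA vocab = fun d w => d.insert (pvKeyOf vocab w) (d.getD (pvKeyOf vocab w) 0 + 1) :=
    funext fun d => funext fun w => pvStepA_eq vocab d w
  have hm := List.foldl_map (f := pvKeyOf vocab)
    (g := fun (d : PySem.Dict String Int) x => d.insert x (d.getD x 0 + 1))
    (l := data.flatten) (init := PySem.Dict.empty)
  rw [h, ← hm, PySem.Dict.foldl_insert_getD_add_one_eq_counter]

-- value of B's aggregation fold at any key
theorem pvAgg_getD (vocab : List String) (ps : List (String × Int)) (r : PySem.Dict String Int) (k : String) :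
    (ps.foldl (fun r (p : String × Int) => r.insert (pvKeyOf vocab p.1) (r.getD (pvKeyOf vocab p.1) 0 + p.2)) r).getD k 0
      = r.getD k 0 + ((ps.filter (fun p => pvKeyOf vocab p.1 == k)).map Prod.snd).sum := by
  induction ps generalizing r with
  | nil => simp
  | cons p t ih =>
    simp only [List.foldl_cons, ih, List.filter_cons]
    by_cases h : pvKeyOf vocab p.1 = k
    · simp [h]
      ring
    · simp [h, PySem.Dict.getD_insert, Ne.symm h]

-- deduplication commutes with mapping through a key function
theorem pvOfList_map (f : String → String) (l : List String) :
    PySem.Set.ofList (l.map f) = PySem.Set.ofList ((PySem.Set.ofList l).map f) := by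
  induction l using List.reverseRecOn with
  | nil => simp
  | append_singleton l x ih =>
    rw [List.map_append, List.map_singleton, PySem.Set.ofList_append_singleton,
        PySem.Set.ofList_append_singleton]
    by_cases hx : x ∈ l
    · rw [PySem.Set.add_of_mem ((PySem.Set.mem_ofList (l.map f) (f x)).2
            (List.mem_map_of_mem hx)),
          PySem.Set.add_of_mem ((PySem.Set.mem_ofList l x).2 hx), ih]
    · rw [PySem.Set.add_of_not_mem (fun h => hx ((PySem.Set.mem_ofList l x).1 h)),
          List.map_append, List.map_singleton, PySem.Set.ofList_append_singleton, ih]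

-- summing the raw counts of the distinct words hitting key k counts the mapped stream
theorem pvSum_counts (vocab : List String) (ws : List String) (k : String) :
    (((PySem.Set.ofList ws).filter (fun w => pvKeyOf vocab w == k)).map
        (fun w => (List.count w ws : Int))).sum
      = ((ws.map (pvKeyOf vocab)).count k : Int) := by
  have hperm : (PySem.Set.ofList ws).Perm ws.dedup := by
    rw [List.perm_ext_iff_of_nodup (PySem.Set.nodup_ofList ws) ws.nodup_dedup]
    intro a; simp [PySem.Set.mem_ofList]
  have hperm2 := ((hperm.filter (fun w => pvKeyOf vocab w == k)).map
    (fun w => (List.count w ws : Nat))).sum_eq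
  have hnat := List.sum_map_count_dedup_filter_eq_countP (fun w => pvKeyOf vocab w == k) ws
  have : (((PySem.Set.ofList ws).filter (fun w => pvKeyOf vocab w == k)).map
      (fun w => List.count w ws)).sum = (ws.map (pvKeyOf vocab)).count k := by
    rw [hperm2, hnat, List.count_eq_countP, List.countP_map]
    rfl
  calc (((PySem.Set.ofList ws).filter (fun w => pvKeyOf vocab w == k)).map
        (fun w => (List.count w ws : Int))).sum
      = ((((PySem.Set.ofList ws).filter (fun w => pvKeyOf vocab w == k)).map
        (fun w => List.count w ws)).sum : Int) := by
        rw [Nat.cast_list_sum, List.map_map]; rfl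
    _ = _ := by rw [this]

-- ===== VERDICT (by name: the statement is the Claim_ definition above) =====
theorem extractUnigramCounts_spec : Claim_equal_extractUnigramCounts := by
  intro data vocab _
  unfold Spec_extractUnigramCounts extractUnigramCounts extractUnigramCounts_alt
  rw [pvA_eq_counter]
  rw [← List.foldl_flatten, PySem.Dict.foldl_insert_getD_add_one_eq_counter]
  set ws := data.flatten with hws
  set res := (PySem.Dict.counter ws).items.foldl
    (fun r (p : String × Int) => r.insert (pvKeyOf vocab p.1) (r.getD (pvKeyOf vocab p.1) 0 + p.2))
    PySem.Dict.empty with hres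
  have hnodA : (PySem.Dict.counter (ws.map (pvKeyOf vocab))).keys.Nodup :=
    PySem.Dict.nodup_keys_counter _
  have hnodB : res.keys.Nodup := by
    rw [hres]
    exact PySem.Dict.nodup_keys_foldl_insert_key (PySem.Dict.counter ws).items
      (fun (p : String × Int) => pvKeyOf vocab p.1)
      (fun r p => r.getD (pvKeyOf vocab p.1) 0 + p.2) PySem.Dict.empty (by simp)
  have hkeys : (PySem.Dict.counter (ws.map (pvKeyOf vocab))).keys = res.keys := by
    have hk := PySem.Dict.keys_foldl_insert_key (PySem.Dict.counter ws).items
      (fun (p : String × Int) => pvKeyOf vocab p.1)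
      (fun r p => r.getD (pvKeyOf vocab p.1) 0 + p.2) PySem.Dict.empty
    rw [hres, hk]
    rw [PySem.Dict.keys_counter, PySem.Dict.keys_empty, PySem.Set.update_nil_left,
        PySem.Dict.items_counter, List.map_map]
    exact pvOfList_map (pvKeyOf vocab) ws
  have hget : ∀ k, (PySem.Dict.counter (ws.map (pvKeyOf vocab))).getD k 0 = res.getD k 0 := by
    intro k
    rw [hres, pvAgg_getD, PySem.Dict.getD_empty, PySem.Dict.getD_counter,
        PySem.Dict.items_counter, List.filter_map, List.map_map, zero_add]
    exact (pvSum_counts vocab ws k).symm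
  rw [PySem.Dict.items_eq_map_keys _ hnodA (0 : Int), PySem.Dict.items_eq_map_keys _ hnodB (0 : Int),
      hkeys]
  exact List.map_congr_left fun k _ => by rw [hget k]
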